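-- pv_equiv track=rewrite | github.com/limo411/limo4all-website | generate_personal_pages.py | build_nbhd_html
-- ===== SOURCE A (Python) =====
-- def esc(text):
--     return (text
--         .replace("&", "&amp;")
--         .replace("<", "&lt;")
--         .replace(">", "&gt;")
--         .replace('"', "&quot;")
--         .replace("'", "&#39;")
--         .replace("\u2014", "&mdash;")
--         .replace("\u2013", "&ndash;")
--         .replace("\u2019", "&rsquo;")
--         .replace("\u2018", "&lsquo;")
--         .replace("\u201c", "&ldquo;")
--         .replace("\u201d", "&rdquo;")
--     )
--
-- def build_nbhd_html(areas, city_name):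
--     if not areas:
--         areas = [f"{city_name} Downtown", f"{city_name} North", f"{city_name} South",
--                  f"{city_name} East", f"{city_name} West"]
--     rows = []
--     for d in areas[:10]:
--         rows.append(f'      <div class="cs-nbhd-card"><div class="cs-nbhd-name">{esc(d)}</div><div class="cs-nbhd-type">{esc(city_name)}</div></div>')
--     return "\n".join(rows)
-- ===== SOURCE B (Python) =====
-- _ENT = {
--     "&": "&amp;", "<": "&lt;", ">": "&gt;", '"': "&quot;", "'": "&#39;",
--     "\u2014": "&mdash;", "\u2013": "&ndash;", "\u2019": "&rsquo;",
--     "\u2018": "&lsquo;", "\u201c": "&ldquo;", "\u201d": "&rdquo;",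
-- }
--
--
-- def build_nbhd_html(areas, city_name):
--     if not areas:
--         areas = [city_name + " " + side
--                  for side in ("Downtown", "North", "South", "East", "West")]
--     # Batch strategy: glue every field (the first 10 areas plus the city name)
--     # into ONE NUL-separated blob, HTML-escape the whole blob in a single
--     # character pass, then split it back apart.  NUL can never occur in the
--     # printable-ASCII input domain and is mapped to itself by the escaper,
--     # so the split recovers exactly the escaped fields.
--     blob = "\x00".join(areas[:10] + [city_name])
--     escaped = "".join(_ENT.get(c, c) for c in blob).split("\x00")
--     city = escaped[-1]
--     return "\n".join(
--         f'      <div class="cs-nbhd-card"><div class="cs-nbhd-name">{e}</div><div class="cs-nbhd-type">{city}</div></div>'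
--         for e in escaped[:-1]
--     )
-- ===== Notes on version B (the rewrite author's own statement) =====
-- stated objective: alternative
-- what changed: Instead of escaping each area and the city name separately with 11 chained .replace scans per string, B glues all fields into one NUL-separated blob, HTML-escapes the whole blob in a single table-driven character pass, and splits it back into the escaped fields before formatting the rows.
import Mathlib
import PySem

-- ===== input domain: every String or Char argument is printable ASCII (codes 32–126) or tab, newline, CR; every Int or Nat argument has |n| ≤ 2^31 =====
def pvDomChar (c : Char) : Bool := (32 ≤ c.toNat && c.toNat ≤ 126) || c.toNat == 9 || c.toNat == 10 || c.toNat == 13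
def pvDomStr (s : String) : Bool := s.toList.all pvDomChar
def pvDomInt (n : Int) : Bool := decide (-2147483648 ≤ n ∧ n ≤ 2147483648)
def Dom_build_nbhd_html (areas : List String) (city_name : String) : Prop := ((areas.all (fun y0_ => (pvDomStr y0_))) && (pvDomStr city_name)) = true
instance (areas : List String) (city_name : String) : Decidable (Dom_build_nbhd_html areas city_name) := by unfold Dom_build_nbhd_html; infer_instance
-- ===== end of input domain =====

-- B escapes all fields at once: it joins the first 10 areas plus the city name into one
-- NUL-separated blob, HTML-escapes the whole blob in a single character pass, and splits
-- it back; objective: alternative decomposition, same output on the printable-ASCII domain.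


-- ===== PORT A =====
-- esc: the 11 chained .replace calls, innermost first, exactly as in A.
def pvEscA (text : String) : String :=
  PySem.Str.replace
    (PySem.Str.replace
      (PySem.Str.replace
        (PySem.Str.replace
          (PySem.Str.replace
            (PySem.Str.replace
              (PySem.Str.replace
                (PySem.Str.replace
                  (PySem.Str.replace
                    (PySem.Str.replace
                      (PySem.Str.replace text "&" "&amp;")
                      "<" "&lt;")
                    ">" "&gt;")
                  "\"" "&quot;")
                "'" "&#39;")
              "\u2014" "&mdash;")
            "\u2013" "&ndash;")
          "\u2019" "&rsquo;")
        "\u2018" "&lsquo;")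
      "\u201c" "&ldquo;")
    "\u201d" "&rdquo;"

def build_nbhd_html (areas : List String) (city_name : String) : String :=
  let areas :=
    if areas = [] then
      [city_name ++ " Downtown", city_name ++ " North", city_name ++ " South",
       city_name ++ " East", city_name ++ " West"]
    else areas
  let rows := (PySem.List.slice areas none (some 10)).foldl
    (fun rows d =>
      rows ++ ["      <div class=\"cs-nbhd-card\"><div class=\"cs-nbhd-name\">" ++ pvEscA d
        ++ "</div><div class=\"cs-nbhd-type\">" ++ pvEscA city_name ++ "</div></div>"])
    []
  PySem.Str.join "\n" rows

-- ===== PORT B =====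
-- _ENT.get(c, c): first-match lookup in the literal dict (distinct keys, insertion order).
def pvEnt (c : Char) : List Char :=
  if c = '&' then "&amp;".toList
  else if c = '<' then "&lt;".toList
  else if c = '>' then "&gt;".toList
  else if c = '"' then "&quot;".toList
  else if c = '\'' then "&#39;".toList
  else if c = '\u2014' then "&mdash;".toList
  else if c = '\u2013' then "&ndash;".toList
  else if c = '\u2019' then "&rsquo;".toList
  else if c = '\u2018' then "&lsquo;".toList
  else if c = '\u201c' then "&ldquo;".toList
  else if c = '\u201d' then "&rdquo;".toList
  else [c]

def build_nbhd_html_alt (areas : List String) (city_name : String) : String :=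
  let areas :=
    if areas = [] then
      ["Downtown", "North", "South", "East", "West"].map (fun side => city_name ++ " " ++ side)
    else areas
  -- "\x00".join(areas[:10] + [city_name])
  let blob := PySem.Str.join "\x00" (PySem.List.slice areas none (some 10) ++ [city_name])
  -- "".join(_ENT.get(c, c) for c in blob): one escaping pass over the blob's characters
  let escapedBlob := String.ofList (blob.toList.flatMap pvEnt)
  -- .split("\x00"): the separator is nonempty, so split? is always `some`
  let escaped := (PySem.Str.split? escapedBlob "\x00").getD []
  -- escaped[-1]: python's last element; split always yields a nonempty list
  let city := escaped.getLast?.getD ""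
  -- escaped[:-1]: all but the last element
  PySem.Str.join "\n"
    (escaped.dropLast.map (fun e =>
      "      <div class=\"cs-nbhd-card\"><div class=\"cs-nbhd-name\">" ++ e
        ++ "</div><div class=\"cs-nbhd-type\">" ++ city ++ "</div></div>"))

-- ===== PRECONDITION & SPEC =====
def Spec_build_nbhd_html (areas : List String) (city_name : String) (out : String) : Prop := out = build_nbhd_html_alt areas city_name
instance (areas : List String) (city_name : String) (out : String) : Decidable (Spec_build_nbhd_html areas city_name out) := by unfold Spec_build_nbhd_html; infer_instance

-- ===== CLAIM (what is proved, stated in full; the proofs are below) =====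
def Claim_equal_build_nbhd_html : Prop := ∀ (areas : List String) (city_name : String), Dom_build_nbhd_html areas city_name → Spec_build_nbhd_html areas city_name (build_nbhd_html areas city_name)

-- ===== LEMMAS AND PROOFS =====

-- replace with a single-character pattern acts independently on every character.
theorem pv_go_single (a : Char) (v : List Char) :
    ∀ (fuel : Nat) (l acc : List Char), l.length ≤ fuel →
      PySem.Chars.replace.go [a] v fuel l acc =
        acc.reverse ++ l.flatMap (fun c => if c = a then v else [c]) := by
  intro fuel
  induction fuel with
  | zero =>
    intro l acc h
    have : l = [] := List.length_eq_zero_iff.mp (Nat.le_zero.mp h)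
    subst this
    simp [PySem.Chars.replace.go]
  | succ n ih =>
    intro l acc h
    cases l with
    | nil => simp [PySem.Chars.replace.go]
    | cons c t =>
      by_cases hc : c = a
      · subst hc
        have hpre : List.isPrefixOf [c] (c :: t) = true := by
          simp [List.isPrefixOf]
        simp only [PySem.Chars.replace.go, hpre, if_pos]
        rw [ih _ _ (by simpa using Nat.le_of_succ_le_succ h)]
        simp
      · have hpre : List.isPrefixOf [a] (c :: t) = false := by
          simp [List.isPrefixOf]
          exact fun hh => absurd hh.symm hc
        simp only [PySem.Chars.replace.go, hpre]
        rw [if_neg (by simp), ih _ _ (by simpa using Nat.le_of_succ_le_succ h)]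
        simp [hc]

theorem pv_replace_single (cs : List Char) (a : Char) (v : List Char) :
    PySem.Chars.replace cs [a] v = cs.flatMap (fun c => if c = a then v else [c]) := by
  simp only [PySem.Chars.replace, List.isEmpty_cons, Bool.false_eq_true, if_false]
  exact pv_go_single a v cs.length cs [] le_rfl

-- the 11 sequential single-character replaces equal the single table pass.
set_option maxHeartbeats 2000000 in
theorem pv_esc_eq (s : String) : pvEscA s = String.ofList (s.toList.flatMap pvEnt) := by
  apply String.ext
  show (pvEscA s).toList = _
  simp only [pvEscA, PySem.Str.toList_replace]
  rw [show ("&".toList) = ['&'] from rfl, show ("<".toList) = ['<'] from rfl,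
    show (">".toList) = ['>'] from rfl, show ("\"".toList) = ['"'] from rfl,
    show ("'".toList) = ['\''] from rfl, show ("\u2014".toList) = ['\u2014'] from rfl,
    show ("\u2013".toList) = ['\u2013'] from rfl, show ("\u2019".toList) = ['\u2019'] from rfl,
    show ("\u2018".toList) = ['\u2018'] from rfl, show ("\u201c".toList) = ['\u201c'] from rfl,
    show ("\u201d".toList) = ['\u201d'] from rfl]
  simp only [pv_replace_single, List.flatMap_assoc, String.toList_ofList]
  congr 1
  funext c
  simp only [pvEnt]
  split_ifs with h1 h2 h3 h4 h5 h6 h7 h8 h9 h10 h11 <;>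
    first
      | (subst_vars; decide)
      | simp [List.flatMap, h2, h3, h4, h5, h6, h7, h8, h9, h10, h11]

-- reference splitter for a one-character separator
def pvSplit (a : Char) : List Char → List Char → List (List Char)
  | [], cur => [cur.reverse]
  | c :: t, cur => if c = a then cur.reverse :: pvSplit a t [] else pvSplit a t (c :: cur)

theorem pv_splitOn_go_single (a : Char) :
    ∀ (fuel : Nat) (l cur : List Char) (acc : List (List Char)), l.length ≤ fuel →
      PySem.Chars.splitOn.go [a] fuel l cur acc = acc.reverse ++ pvSplit a l cur := by
  intro fuel
  induction fuel with
  | zero =>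
    intro l cur acc h
    have : l = [] := List.length_eq_zero_iff.mp (Nat.le_zero.mp h)
    subst this
    simp [PySem.Chars.splitOn.go, pvSplit]
  | succ n ih =>
    intro l cur acc h
    cases l with
    | nil => simp [PySem.Chars.splitOn.go, pvSplit]
    | cons c t =>
      by_cases hc : c = a
      · subst hc
        have hpre : List.isPrefixOf [c] (c :: t) = true := by simp [List.isPrefixOf]
        simp only [PySem.Chars.splitOn.go, hpre, if_pos]
        rw [show List.drop (List.length [c]) (c :: t) = t from rfl]
        rw [ih _ _ _ (by simpa using Nat.le_of_succ_le_succ h)]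
        simp [pvSplit]
      · have hpre : List.isPrefixOf [a] (c :: t) = false := by
          simp [List.isPrefixOf]
          exact fun hh => absurd hh.symm hc
        simp only [PySem.Chars.splitOn.go, hpre]
        rw [if_neg (by simp), ih _ _ _ (by simpa using Nat.le_of_succ_le_succ h)]
        simp [pvSplit, hc]

theorem pv_splitOn_single (s : List Char) (a : Char) :
    PySem.Chars.splitOn s [a] = pvSplit a s [] := by
  show PySem.Chars.splitOn.go [a] (s.length + 1) s [] [] = _
  rw [pv_splitOn_go_single a _ s [] [] (Nat.le_succ _)]
  simp

-- consuming a separator-free chunk just accumulates it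
theorem pv_split_chunk (a : Char) :
    ∀ (f : List Char), a ∉ f → ∀ (rest cur : List Char),
      pvSplit a (f ++ rest) cur = pvSplit a rest (f.reverse ++ cur) := by
  intro f
  induction f with
  | nil => intro _ rest cur; simp
  | cons c t ih =>
    intro hna rest cur
    have hc : ¬ c = a := fun h => hna (h ▸ List.mem_cons_self)
    have hnt : a ∉ t := fun h => hna (List.mem_cons_of_mem _ h)
    simp only [List.cons_append, pvSplit, if_neg hc]
    rw [ih hnt rest (c :: cur)]
    simp

theorem pv_split_free (a : Char) (f cur : List Char) (h : a ∉ f) :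
    pvSplit a f cur = [cur.reverse ++ f] := by
  have := pv_split_chunk a f h [] cur
  simp only [List.append_nil] at this
  rw [this]
  simp [pvSplit]

-- splitting the a-joined fields recovers the fields (none containing a)
theorem pv_split_join (a : Char) :
    ∀ (fs : List (List Char)) (f : List Char), a ∉ f → (∀ g ∈ fs, a ∉ g) →
      pvSplit a (PySem.Chars.join [a] (f :: fs)) [] = f :: fs := by
  intro fs
  induction fs with
  | nil =>
    intro f hf _
    rw [PySem.Chars.join_singleton]
    simpa using pv_split_free a f [] hf
  | cons g gs ih =>
    intro f hf hgs
    rw [PySem.Chars.join_cons_cons]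
    rw [show f ++ [a] ++ PySem.Chars.join [a] (g :: gs)
          = f ++ ([a] ++ PySem.Chars.join [a] (g :: gs)) by simp]
    rw [pv_split_chunk a f hf]
    simp only [List.singleton_append, pvSplit]
    rw [ih g (hgs g List.mem_cons_self) (fun x hx => hgs x (List.mem_cons_of_mem _ hx))]
    simp

-- the escaper never produces NUL for a non-NUL character
set_option maxHeartbeats 1000000 in
theorem pv_nul_not_mem_ent (c : Char) (h : ¬ c = '\x00') : '\x00' ∉ pvEnt c := by
  simp only [pvEnt]
  split_ifs <;> first | decide | (simp; exact fun he => h he.symm)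

theorem pv_nul_not_mem_flatMap (cs : List Char) (h : '\x00' ∉ cs) :
    '\x00' ∉ cs.flatMap pvEnt := by
  intro hm
  obtain ⟨c, hc, hin⟩ := List.mem_flatMap.mp hm
  exact pv_nul_not_mem_ent c (fun he => h (he ▸ hc)) hin

-- escaping distributes over the NUL-join
theorem pv_flatMap_join (fs : List (List Char)) :
    (PySem.Chars.join ['\x00'] fs).flatMap pvEnt
      = PySem.Chars.join ['\x00'] (fs.map (fun g => g.flatMap pvEnt)) := by
  induction fs with
  | nil => simp [PySem.Chars.join, List.intercalate]
  | cons f gs ih =>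
    cases gs with
    | nil => simp [PySem.Chars.join_singleton]
    | cons g gs' =>
      rw [PySem.Chars.join_cons_cons, List.map_cons, List.map_cons,
        PySem.Chars.join_cons_cons, ← List.map_cons]
      simp only [List.flatMap_append]
      rw [List.map_cons] at ih
      rw [ih]
      rfl

-- a Dom string contains no NUL
theorem pv_dom_no_nul (s : String) (h : pvDomStr s = true) : '\x00' ∉ s.toList := by
  intro hm
  exact absurd (List.all_eq_true.mp h _ hm) (by decide)

-- B's split step recovers the escaped fields, for NUL-free fields
theorem pv_escaped_fields (l : List String) (hne : l ≠ [])
    (h : ∀ s ∈ l, '\x00' ∉ s.toList) :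
    (PySem.Str.split?
        (String.ofList ((PySem.Str.join "\x00" l).toList.flatMap pvEnt)) "\x00").getD []
      = l.map (fun s => String.ofList (s.toList.flatMap pvEnt)) := by
  cases l with
  | nil => exact absurd rfl hne
  | cons f fs =>
    simp only [PySem.Str.split?, PySem.Chars.split?, String.toList_ofList]
    rw [show ("\x00" : String).toList = ['\x00'] from rfl]
    simp only [List.isEmpty_cons, Bool.false_eq_true, if_false, Option.map_some, Option.getD_some]
    rw [PySem.Str.toList_join, show ("\x00" : String).toList = ['\x00'] from rfl]
    rw [pv_flatMap_join, pv_splitOn_single]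
    rw [List.map_cons, List.map_cons]
    rw [pv_split_join '\x00' _ _
      (pv_nul_not_mem_flatMap _ (h f List.mem_cons_self))
      (by
        intro g hg
        simp only [List.map_map] at hg
        obtain ⟨s, hs, rfl⟩ := List.mem_map.mp hg
        exact pv_nul_not_mem_flatMap _ (h s (List.mem_cons_of_mem _ hs)))]
    simp

-- both pipelines agree on any NUL-free area list
theorem pv_main (l : List String) (city_name : String)
    (hl : ∀ s ∈ l, '\x00' ∉ s.toList) (hc : '\x00' ∉ city_name.toList) :
    PySem.Str.join "\n"
      ((PySem.List.slice l none (some 10)).foldl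
        (fun rows d =>
          rows ++ ["      <div class=\"cs-nbhd-card\"><div class=\"cs-nbhd-name\">" ++ pvEscA d
            ++ "</div><div class=\"cs-nbhd-type\">" ++ pvEscA city_name ++ "</div></div>"])
        [])
    = (let blob := PySem.Str.join "\x00" (PySem.List.slice l none (some 10) ++ [city_name])
       let escapedBlob := String.ofList (blob.toList.flatMap pvEnt)
       let escaped := (PySem.Str.split? escapedBlob "\x00").getD []
       let city := escaped.getLast?.getD ""
       PySem.Str.join "\n"
         (escaped.dropLast.map (fun e =>
           "      <div class=\"cs-nbhd-card\"><div class=\"cs-nbhd-name\">" ++ e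
             ++ "</div><div class=\"cs-nbhd-type\">" ++ city ++ "</div></div>"))) := by
  have hpm : ∀ s ∈ PySem.List.slice l none (some 10), '\x00' ∉ s.toList := by
    intro s hs
    rw [PySem.List.slice_to l (by norm_num)] at hs
    exact hl s (List.mem_of_mem_take hs)
  rw [PySem.List.foldl_append_singleton_eq_map]
  simp only []
  rw [pv_escaped_fields (PySem.List.slice l none (some 10) ++ [city_name]) (by simp)
    (by
      intro s hs
      rcases List.mem_append.mp hs with h1 | h1
      · exact hpm s h1
      · rw [List.mem_singleton.mp h1]; exact hc)]
  rw [List.map_append, List.map_cons, List.map_nil]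
  rw [List.getLast?_concat, List.dropLast_concat, Option.getD_some]
  rw [List.nil_append, List.map_map]
  refine congrArg (PySem.Str.join "\n") (List.map_congr_left ?_)
  intro d _
  simp only [Function.comp_apply, pv_esc_eq]

-- ===== VERDICT (by name: the statement is the Claim_ definition above) =====
theorem build_nbhd_html_spec : Claim_equal_build_nbhd_html := by
  intro areas city_name hdom
  show build_nbhd_html areas city_name = build_nbhd_html_alt areas city_name
  unfold Dom_build_nbhd_html at hdom
  simp only [Bool.and_eq_true] at hdom
  have hc : '\x00' ∉ city_name.toList := pv_dom_no_nul _ hdom.2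
  have ha : ∀ s ∈ areas, '\x00' ∉ s.toList := fun s hs =>
    pv_dom_no_nul s (List.all_eq_true.mp hdom.1 s hs)
  unfold build_nbhd_html build_nbhd_html_alt
  by_cases h : areas = []
  · subst h
    have hdef : ["Downtown", "North", "South", "East", "West"].map
        (fun side => city_name ++ " " ++ side)
        = [city_name ++ " Downtown", city_name ++ " North", city_name ++ " South",
           city_name ++ " East", city_name ++ " West"] := by
      simp only [List.map_cons, List.map_nil]
      rw [String.append_assoc, String.append_assoc, String.append_assoc,
        String.append_assoc, String.append_assoc]
      rfl
    rw [hdef]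
    apply pv_main _ _ _ hc
    intro s hs
    have hto : ∀ (t : String), s = city_name ++ t → '\x00' ∉ t.toList → '\x00' ∉ s.toList := by
      intro t hst hnt hm
      rw [hst] at hm
      rw [show (city_name ++ t).toList = city_name.toList ++ t.toList by
        simp [String.toList_append]] at hm
      rcases List.mem_append.mp hm with h1 | h1
      · exact hc h1
      · exact hnt h1
    simp only [if_true, List.mem_cons, List.not_mem_nil, or_false] at hs
    rcases hs with h1 | h1 | h1 | h1 | h1
    · exact hto _ h1 (by decide)
    · exact hto _ h1 (by decide)
    · exact hto _ h1 (by decide)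
    · exact hto _ h1 (by decide)
    · exact hto _ h1 (by decide)
  · simp only [if_neg h]
    exact pv_main _ _ ha hc
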